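-- pv_equiv track=rewrite | github.com/KaviC2002/Coin-Detection-System | CS373_coin_detection_extension.py | dilate
-- ===== SOURCE A (Python) =====
-- def createInitializedGreyscalePixelArray(image_width, image_height, initValue = 0):
--     new_pixel_array = []
--     for _ in range(image_height):
--         new_row = []
--         for _ in range(image_width):
--             new_row.append(initValue)
--         new_pixel_array.append(new_row)
--
--     return new_pixel_array
--
-- def dilate(image_width, image_height, greyscale_array, kernel):
--     kernel_size = len(kernel)
--     offset = kernel_size // 2
--     dilated_array = createInitializedGreyscalePixelArray(image_width, image_height)
--
--     for i in range(image_height):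
--         for j in range(image_width):
--             max_value = 0
--             for ki in range(kernel_size):
--                 for kj in range(kernel_size):
--                     if kernel[ki][kj] == 1:
--                         ni = i + ki - offset
--                         nj = j + kj - offset
--                         if 0 <= ni < image_height and 0 <= nj < image_width:
--                             max_value = max(max_value, greyscale_array[ni][nj])
--             dilated_array[i][j] = max_value
--     return dilated_array
-- ===== SOURCE B (Python) =====
-- def dilate(image_width, image_height, greyscale_array, kernel):
--     # Scatter/push dilation: each input pixel pushes its value to every output
--     # cell its kernel footprint covers, instead of each output cell gathering.
--     kernel_size = len(kernel)
--     offset = kernel_size // 2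
--     out = [[0] * image_width for _ in range(image_height)]
--     for ni in range(image_height):
--         for nj in range(image_width):
--             v = greyscale_array[ni][nj]
--             for ki in range(kernel_size):
--                 for kj in range(kernel_size):
--                     if kernel[ki][kj] == 1:
--                         i = ni - ki + offset
--                         j = nj - kj + offset
--                         if 0 <= i < image_height and 0 <= j < image_width:
--                             out[i][j] = max(out[i][j], v)
--     return out
-- ===== Notes on version B (the rewrite author's own statement) =====
-- stated objective: alternative
-- what changed: B replaces A's per-output-pixel gather over the kernel by a scatter pass: it loops over input pixels and pushes each value v = greyscale[ni][nj] to every output cell (ni-ki+offset, nj-kj+offset) its kernel footprint covers, accumulating with max into a zero-initialized output.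
-- outside the precondition, e.g. on dilate(2, 2, [[5, 6]], [[0]]): A returns [[0, 0], [0, 0]], B raises IndexError
import Mathlib
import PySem

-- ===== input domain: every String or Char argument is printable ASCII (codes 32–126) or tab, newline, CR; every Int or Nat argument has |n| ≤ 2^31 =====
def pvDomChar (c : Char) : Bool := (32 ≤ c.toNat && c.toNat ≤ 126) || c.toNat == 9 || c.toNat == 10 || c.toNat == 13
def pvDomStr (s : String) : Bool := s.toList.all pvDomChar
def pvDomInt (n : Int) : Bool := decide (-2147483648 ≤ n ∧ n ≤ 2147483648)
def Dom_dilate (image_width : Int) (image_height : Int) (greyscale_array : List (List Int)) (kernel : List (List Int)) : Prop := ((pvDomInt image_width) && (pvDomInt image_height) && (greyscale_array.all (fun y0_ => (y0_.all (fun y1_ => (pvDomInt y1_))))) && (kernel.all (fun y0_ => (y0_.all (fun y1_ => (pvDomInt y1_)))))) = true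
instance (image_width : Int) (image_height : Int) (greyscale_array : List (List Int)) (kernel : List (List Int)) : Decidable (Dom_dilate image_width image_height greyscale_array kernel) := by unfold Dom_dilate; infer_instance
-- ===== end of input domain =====

-- B replaces A's per-output-pixel gather over the kernel by a scatter pass over input
-- pixels (same asymptotic cost; objective: alternative decomposition).

-- ===== PORT A =====
-- m[a][b] totalised with defaults; under Pre_dilate every access the ports make is in range.
def pyGet2 (m : List (List Int)) (a b : Int) : Int :=
  (PySem.List.pyGet? ((PySem.List.pyGet? m a).getD []) b).getD 0

-- m[a][b] = v; only used with 0 ≤ a < len m, 0 ≤ b < len m[a] (loop indices after a bounds check).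
def pySet2 (m : List (List Int)) (a b : Int) (v : Int) : List (List Int) :=
  m.modify a.toNat (fun r => r.set b.toNat v)

def createInitializedGreyscalePixelArray (image_width image_height initValue : Int) : List (List Int) :=
  (PySem.List.pyRange 0 image_height 1).foldl
    (fun arr _ =>
      arr ++ [(PySem.List.pyRange 0 image_width 1).foldl (fun row _ => row ++ [initValue]) []]) []

-- the inner 'max_value' double loop of A, for output cell (i, j)
def dilateMaxVal (image_width image_height : Int) (greyscale_array kernel : List (List Int))
    (ks off i j : Int) : Int :=
  (PySem.List.pyRange 0 ks 1).foldl (fun mv ki =>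
    (PySem.List.pyRange 0 ks 1).foldl (fun mv kj =>
      if pyGet2 kernel ki kj = 1 then
        let ni := i + ki - off
        let nj := j + kj - off
        if 0 ≤ ni ∧ ni < image_height ∧ 0 ≤ nj ∧ nj < image_width then
          max mv (pyGet2 greyscale_array ni nj)
        else mv
      else mv) mv) 0

def dilate (image_width : Int) (image_height : Int) (greyscale_array : List (List Int)) (kernel : List (List Int)) : List (List Int) :=
  let ks : Int := (kernel.length : Int)
  let off : Int := PySem.Int.floordiv ks 2
  let d0 := createInitializedGreyscalePixelArray image_width image_height 0
  (PySem.List.pyRange 0 image_height 1).foldl (fun d i =>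
    (PySem.List.pyRange 0 image_width 1).foldl (fun d j =>
      pySet2 d i j (dilateMaxVal image_width image_height greyscale_array kernel ks off i j)) d) d0

-- ===== PORT B =====
def dilate_alt (image_width : Int) (image_height : Int) (greyscale_array : List (List Int)) (kernel : List (List Int)) : List (List Int) :=
  let ks : Int := (kernel.length : Int)
  let off : Int := PySem.Int.floordiv ks 2
  let out0 : List (List Int) := List.replicate image_height.toNat (List.replicate image_width.toNat (0 : Int))
  (PySem.List.pyRange 0 image_height 1).foldl (fun out ni =>
    (PySem.List.pyRange 0 image_width 1).foldl (fun out nj =>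
      let v := pyGet2 greyscale_array ni nj                     -- greyscale_array[ni][nj]; in range under Pre_
      (PySem.List.pyRange 0 ks 1).foldl (fun out ki =>
        (PySem.List.pyRange 0 ks 1).foldl (fun out kj =>
          if pyGet2 kernel ki kj = 1 then
            let i := ni - ki + off
            let j := nj - kj + off
            if 0 ≤ i ∧ i < image_height ∧ 0 ≤ j ∧ j < image_width then
              pySet2 out i j (max (pyGet2 out i j) v)
            else out
          else out) out) out) out) out0

-- ===== PRECONDITION & SPEC =====
-- Pre_ excludes exactly the inputs on which the Python raises IndexError: with a non-empty
-- image, A reads every kernel cell and B reads every image pixel, so kernel rows must reach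
-- kernel_size and the first image_height greyscale rows must reach image_width.  (A itself
-- skips greyscale reads whose kernel cell is 0 — on such short-greyscale inputs A returns
-- zeros while B raises, see the cite in the claim.)
def Pre_dilate (image_width : Int) (image_height : Int) (greyscale_array : List (List Int)) (kernel : List (List Int)) : Prop :=
  image_height ≤ 0 ∨ image_width ≤ 0 ∨
    (image_height ≤ (greyscale_array.length : Int) ∧
     (∀ r ∈ greyscale_array.take image_height.toNat, image_width ≤ (r.length : Int)) ∧
     (∀ r ∈ kernel, (kernel.length : Int) ≤ (r.length : Int)))
instance (image_width : Int) (image_height : Int) (greyscale_array : List (List Int)) (kernel : List (List Int)) : Decidable (Pre_dilate image_width image_height greyscale_array kernel) := by unfold Pre_dilate; infer_instance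

def pvWitness_dilate : Int × Int × List (List Int) × List (List Int) :=
  (2, 2, [[1, 2], [3, 4]], [[1]])

def Spec_dilate (image_width : Int) (image_height : Int) (greyscale_array : List (List Int)) (kernel : List (List Int)) (out : List (List Int)) : Prop := out = dilate_alt image_width image_height greyscale_array kernel
instance (image_width : Int) (image_height : Int) (greyscale_array : List (List Int)) (kernel : List (List Int)) (out : List (List Int)) : Decidable (Spec_dilate image_width image_height greyscale_array kernel out) := by unfold Spec_dilate; infer_instance

-- ===== CLAIM (what is proved, stated in full; the proofs are below) =====
def Claim_equal_dilate : Prop := ∀ (image_width : Int) (image_height : Int) (greyscale_array : List (List Int)) (kernel : List (List Int)), Dom_dilate image_width image_height greyscale_array kernel → Pre_dilate image_width image_height greyscale_array kernel → Spec_dilate image_width image_height greyscale_array kernel (dilate image_width image_height greyscale_array kernel)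

-- ===== LEMMAS AND PROOFS =====

-- ---- generic list lemmas ----

theorem pv_flatMap_if_singleton {α : Type} (c : Int) (G : Int → List α) :
    ∀ (l : List Int), l.Nodup →
      (l.flatMap fun x => if x = c then G x else []) = if c ∈ l then G c else [] := by
  intro l hl
  induction l with
  | nil => simp
  | cons x t ih =>
    simp only [List.flatMap_cons, List.mem_cons]
    rcases List.nodup_cons.mp hl with ⟨hx, ht⟩
    by_cases hxc : x = c
    · subst hxc
      simp [hx, ih ht]
    · simp only [if_neg hxc, List.nil_append, ih ht]
      by_cases hc : c ∈ t <;> simp [hc, Ne.symm hxc]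

theorem pv_foldl_foldl {α β σ : Type} (f : σ → α × β → σ) (l1 : List α) (l2 : List β) (s : σ) :
    l1.foldl (fun s a => l2.foldl (fun s b => f s (a, b)) s) s
      = (l1.flatMap fun a => l2.map (Prod.mk a)).foldl f s := by
  induction l1 generalizing s with
  | nil => rfl
  | cons x t ih =>
    simp only [List.foldl_cons, List.flatMap_cons, List.foldl_append, List.foldl_map, ih]

theorem pv_modify_id {α : Type} (d : List α) (i : Nat) : d.modify i (fun r => r) = d := by
  rw [List.modify_eq_set_getElem?]
  cases h : d[i]? with
  | none => simp
  | some v =>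
    have hi : i < d.length := by
      by_contra hh
      rw [List.getElem?_eq_none (by omega)] at h
      simp at h
    have hv : d[i] = v := by simpa [List.getElem?_eq_getElem hi] using h
    simp [← hv, List.set_getElem_self]

theorem pv_modify_append {α : Type} (pre : List α) (x : α) (t : List α) (f : α → α) :
    (pre ++ x :: t).modify pre.length f = pre ++ f x :: t := by
  rw [List.modify_eq_set_getElem?]
  simp [List.set_append_right]

theorem pv_foldl_modify_comm {α β : Type} (i : Nat) (F : β → α → α) (l : List β) (d : List α) :
    l.foldl (fun d x => d.modify i (F x)) d = d.modify i (fun r => l.foldl (fun r x => F x r) r) := by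
  induction l generalizing d with
  | nil => exact (pv_modify_id d i).symm
  | cons x t ih => simp [ih, List.modify_modify_eq]; rfl

theorem pv_foldl_set_range' {α : Type} (f : Nat → α) :
    ∀ (n a : Nat) (pre suf : List α), pre.length = a → suf.length = n →
      (List.range' a n).foldl (fun l i => l.set i (f i)) (pre ++ suf)
        = pre ++ (List.range' a n).map f := by
  intro n
  induction n with
  | zero => intro a pre suf _ hs; simp [List.length_eq_zero_iff.mp hs]
  | succ n ih =>
    intro a pre suf hp hs
    cases suf with
    | nil => simp at hs
    | cons s0 rest =>
      rw [List.range'_succ, List.foldl_cons]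
      have hset : (pre ++ s0 :: rest).set a (f a) = pre ++ f a :: rest := by
        rw [← hp, List.set_append_right _ _ (Nat.le_refl _)]
        simp
      rw [hset]
      have := ih (a+1) (pre ++ [f a]) rest (by simp [hp]) (by simpa using hs)
      simpa using this

theorem pv_foldl_modify_range' {α : Type} (G : Nat → α → α) :
    ∀ (n a : Nat) (pre : List α) (x : α), pre.length = a →
      (List.range' a n).foldl (fun d i => d.modify i (G i)) (pre ++ List.replicate n x)
        = pre ++ (List.range' a n).map (fun i => G i x) := by
  intro n
  induction n with
  | zero => intro a pre x _; simp
  | succ n ih =>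
    intro a pre x hp
    rw [List.range'_succ, List.foldl_cons, List.replicate_succ]
    have hmod : (pre ++ x :: List.replicate n x).modify a (G a)
        = pre ++ G a x :: List.replicate n x := by
      rw [← hp, pv_modify_append]
    rw [hmod]
    have := ih (a+1) (pre ++ [G a x]) x (by simp [hp])
    simpa using this

theorem pv_flatMap_swap_perm {α β γ : Type} (l1 : List α) (l2 : List β) (f : α → β → List γ) :
    (l1.flatMap fun a => l2.flatMap fun b => f a b).Perm
      (l2.flatMap fun b => l1.flatMap fun a => f a b) := by
  rw [← Multiset.coe_eq_coe, ← Multiset.coe_bind, ← Multiset.coe_bind]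
  simp only [← Multiset.coe_bind]
  exact Multiset.bind_bind _ _

theorem pv_perm_foldl_max {γ : Type} (V : γ → Int) {l1 l2 : List γ} (h : l1.Perm l2) (a : Int) :
    l1.foldl (fun m q => max m (V q)) a = l2.foldl (fun m q => max m (V q)) a := by
  haveI : RightCommutative (fun (m : Int) (q : γ) => max m (V q)) :=
    ⟨fun m p q => by rw [max_right_comm]⟩
  exact h.foldl_eq a

-- ---- pyGet2 / pySet2 on an hn × wn grid ----

theorem pv_pyGet2_natCast (m : List (List Int)) (a b : Nat) :
    pyGet2 m (a : Int) (b : Int) = (m.getD a []).getD b 0 := by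
  simp [pyGet2, PySem.List.pyGet?_natCast, List.getD_eq_getElem?_getD]

theorem pv_pySet2_length (m : List (List Int)) (a b v : Int) :
    (pySet2 m a b v).length = m.length := by
  simp [pySet2]

theorem pv_pySet2_rows {wn : Nat} (m : List (List Int)) (a b v : Int)
    (hm : ∀ r ∈ m, r.length = wn) : ∀ r ∈ pySet2 m a b v, r.length = wn := by
  intro r hr
  rw [pySet2] at hr
  rcases List.mem_iff_getElem.mp hr with ⟨j, hj, hrj⟩
  rw [List.length_modify] at hj
  rw [List.getElem_modify] at hrj
  split at hrj
  · simp only [← hrj, List.length_set]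
    exact hm _ (List.getElem_mem hj)
  · exact hrj ▸ hm _ (List.getElem_mem hj)

theorem pv_pyGet2_pySet2 {hn wn : Nat} (m : List (List Int)) (hlen : m.length = hn)
    (hrow : ∀ r ∈ m, r.length = wn) (i j : Int) (v : Int) (a b : Nat)
    (hi0 : 0 ≤ i) (hi : i < (hn : Int)) (hj0 : 0 ≤ j) (hj : j < (wn : Int))
    (ha : a < hn) (hb : b < wn) :
    pyGet2 (pySet2 m i j v) (a : Int) (b : Int)
      = if i = (a : Int) ∧ j = (b : Int) then v else pyGet2 m (a : Int) (b : Int) := by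
  obtain ⟨i', rfl⟩ : ∃ i' : Nat, i = (i' : Int) := ⟨i.toNat, (Int.toNat_of_nonneg hi0).symm⟩
  obtain ⟨j', rfl⟩ : ∃ j' : Nat, j = (j' : Int) := ⟨j.toNat, (Int.toNat_of_nonneg hj0).symm⟩
  have hi' : i' < hn := by exact_mod_cast hi
  have hj' : j' < wn := by exact_mod_cast hj
  rw [pv_pyGet2_natCast, pv_pyGet2_natCast, pySet2]
  simp only [Int.toNat_natCast]
  have hael : a < m.length := by omega
  have hgd : (m.modify i' (fun r => r.set j' v)).getD a [] =
      if i' = a then m[a].set j' v else m[a] := by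
    rw [List.getD_eq_getElem?_getD, List.getElem?_modify]
    split <;> simp_all
  rw [hgd]
  have hmga : m.getD a [] = m[a] := by
    rw [List.getD_eq_getElem?_getD, List.getElem?_eq_getElem hael]; rfl
  have hbl : b < m[a].length := by rw [hrow _ (List.getElem_mem hael)]; exact hb
  by_cases hia : i' = a
  · subst hia
    rw [if_pos rfl, hmga]
    by_cases hjb : j' = b
    · subst hjb
      rw [if_pos ⟨rfl, rfl⟩]
      rw [List.getD_eq_getElem?_getD, List.getElem?_set_self (by omega)]
      rfl
    · have hne : ¬ ((i' : Int) = (i' : Int) ∧ (j' : Int) = (b : Int)) := by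
        rintro ⟨-, hh⟩; exact hjb (by exact_mod_cast hh)
      rw [if_neg hne]
      rw [List.getD_eq_getElem?_getD, List.getD_eq_getElem?_getD, List.getElem?_set_ne hjb]
  · have hne : ¬ ((i' : Int) = (a : Int) ∧ (j' : Int) = (b : Int)) := by
      rintro ⟨hh, -⟩; exact hia (by exact_mod_cast hh)
    rw [if_neg hne, if_neg hia, hmga]

-- ---- the scatter fold, cell by cell ----

theorem pv_scatter {γ : Type} {hn wn : Nat} (Cp : γ → Prop) [DecidablePred Cp]
    (I J V : γ → Int)
    (hbnd : ∀ q, Cp q → 0 ≤ I q ∧ I q < (hn : Int) ∧ 0 ≤ J q ∧ J q < (wn : Int)) :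
    ∀ (L : List γ) (out : List (List Int)), out.length = hn → (∀ r ∈ out, r.length = wn) →
      ((L.foldl (fun o q => if Cp q then pySet2 o (I q) (J q) (max (pyGet2 o (I q) (J q)) (V q)) else o) out).length = hn
       ∧ (∀ r ∈ L.foldl (fun o q => if Cp q then pySet2 o (I q) (J q) (max (pyGet2 o (I q) (J q)) (V q)) else o) out, r.length = wn))
      ∧ ∀ (a b : Nat), a < hn → b < wn →
        pyGet2 (L.foldl (fun o q => if Cp q then pySet2 o (I q) (J q) (max (pyGet2 o (I q) (J q)) (V q)) else o) out) (a : Int) (b : Int)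
          = (L.filter (fun q => decide (Cp q ∧ I q = (a : Int) ∧ J q = (b : Int)))).foldl
              (fun m q => max m (V q)) (pyGet2 out (a : Int) (b : Int)) := by
  intro L
  induction L with
  | nil => intro out h1 h2; exact ⟨⟨h1, h2⟩, fun a b _ _ => rfl⟩
  | cons q L ih =>
    intro out h1 h2
    simp only [List.foldl_cons, List.filter_cons]
    by_cases hq : Cp q
    · have ho1l : (pySet2 out (I q) (J q) (max (pyGet2 out (I q) (J q)) (V q))).length = hn := by
        rw [pv_pySet2_length, h1]
      have ho1r := pv_pySet2_rows out (I q) (J q) (max (pyGet2 out (I q) (J q)) (V q)) h2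
      rw [if_pos hq]
      refine ⟨(ih _ ho1l ho1r).1, ?_⟩
      intro a b ha hb
      rw [(ih _ ho1l ho1r).2 a b ha hb]
      obtain ⟨hI0, hIlt, hJ0, hJlt⟩ := hbnd q hq
      rw [pv_pyGet2_pySet2 out h1 h2 (I q) (J q) _ a b hI0 hIlt hJ0 hJlt ha hb]
      by_cases htgt : I q = (a : Int) ∧ J q = (b : Int)
      · obtain ⟨hIa, hJb⟩ := htgt
        rw [if_pos ⟨hIa, hJb⟩, if_pos (by simp [hq, hIa, hJb]), List.foldl_cons, hIa, hJb]
      · rw [if_neg htgt, if_neg (by simpa using fun _ hh1 hh2 => htgt ⟨hh1, hh2⟩)]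
    · rw [if_neg hq]
      refine ⟨(ih out h1 h2).1, ?_⟩
      intro a b ha hb
      rw [(ih out h1 h2).2 a b ha hb, if_neg (by simp [hq])]

-- ---- side A as a grid ----

theorem pv_createInit_eq (w h v : Int) :
    createInitializedGreyscalePixelArray w h v
      = List.replicate h.toNat (List.replicate w.toNat v) := by
  unfold createInitializedGreyscalePixelArray
  rw [PySem.List.foldl_append_singleton_eq_map]
  rw [PySem.List.foldl_append_singleton_eq_map]
  simp [List.map_const', PySem.List.length_pyRange_one]

theorem pv_A_grid (w h : Int) (g k : List (List Int)) :
    dilate w h g k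
      = (List.range h.toNat).map (fun (a : Nat) => (List.range w.toNat).map (fun (b : Nat) =>
          dilateMaxVal w h g k (k.length : Int) (PySem.Int.floordiv (k.length : Int) 2) (a : Int) (b : Int))) := by
  have hR : ∀ n : Int, PySem.List.pyRange 0 n 1 = (List.range n.toNat).map (fun a : Nat => (a : Int)) := by
    intro n; rw [PySem.List.pyRange_one]; simp
  unfold dilate
  rw [pv_createInit_eq]
  simp only [hR, List.foldl_map, pySet2, Int.toNat_natCast]
  simp only [pv_foldl_modify_comm]
  rw [List.range_eq_range' (n := h.toNat)]
  have hmain := pv_foldl_modify_range'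
    (fun a r => (List.range w.toNat).foldl
      (fun r b => r.set b (dilateMaxVal w h g k (k.length : Int) (PySem.Int.floordiv (k.length : Int) 2) (a : Int) (b : Int))) r)
    h.toNat 0 [] (List.replicate w.toNat 0) rfl
  simp only [List.nil_append] at hmain
  rw [hmain]
  apply List.map_congr_left
  intro a _
  have hrow := pv_foldl_set_range'
    (fun b => dilateMaxVal w h g k (k.length : Int) (PySem.Int.floordiv (k.length : Int) 2) (a : Int) (b : Int))
    w.toNat 0 [] (List.replicate w.toNat 0) rfl (by simp)
  simp only [List.nil_append] at hrow
  rw [List.range_eq_range' (n := w.toNat), hrow]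

-- ---- side B as the same grid ----

-- quadruple ((ni,nj),(ki,kj)) bookkeeping for the scatter pass
def pvCb (w h off : Int) (k : List (List Int)) (q : (Int × Int) × Int × Int) : Bool :=
  decide (pyGet2 k q.2.1 q.2.2 = 1) && decide (0 ≤ q.1.1 - q.2.1 + off) &&
  decide (q.1.1 - q.2.1 + off < h) && decide (0 ≤ q.1.2 - q.2.2 + off) &&
  decide (q.1.2 - q.2.2 + off < w)

def pvI (off : Int) (q : (Int × Int) × Int × Int) : Int := q.1.1 - q.2.1 + off
def pvJ (off : Int) (q : (Int × Int) × Int × Int) : Int := q.1.2 - q.2.2 + off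
def pvV (g : List (List Int)) (q : (Int × Int) × Int × Int) : Int := pyGet2 g q.1.1 q.1.2

def pvK2 (ks : Int) : List (Int × Int) :=
  (PySem.List.pyRange 0 ks 1).flatMap (fun ki => (PySem.List.pyRange 0 ks 1).map (Prod.mk ki))
def pvL1 (w h : Int) : List (Int × Int) :=
  (PySem.List.pyRange 0 h 1).flatMap (fun ni => (PySem.List.pyRange 0 w 1).map (Prod.mk ni))
def pvQ (w h ks : Int) : List ((Int × Int) × Int × Int) :=
  (pvL1 w h).flatMap (fun p => (pvK2 ks).map (Prod.mk p))

theorem pv_filter_map_flatMap {α β : Type} (p : α → Bool) (f : α → β) :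
    ∀ l : List α, (l.filter p).map f = l.flatMap (fun x => if p x then [f x] else []) := by
  intro l
  induction l with
  | nil => rfl
  | cons x t ih =>
    rw [List.filter_cons, List.flatMap_cons, ← ih]
    by_cases hx : p x <;> simp [hx]

theorem pv_B_flat (w h : Int) (g k : List (List Int)) :
    dilate_alt w h g k
      = (pvQ w h (k.length : Int)).foldl
          (fun o q => if pvCb w h (PySem.Int.floordiv (k.length : Int) 2) k q = true then
              pySet2 o (pvI (PySem.Int.floordiv (k.length : Int) 2) q)
                (pvJ (PySem.Int.floordiv (k.length : Int) 2) q)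
                (max (pyGet2 o (pvI (PySem.Int.floordiv (k.length : Int) 2) q)
                  (pvJ (PySem.Int.floordiv (k.length : Int) 2) q)) (pvV g q))
            else o)
          (List.replicate h.toNat (List.replicate w.toNat 0)) := by
  simp only [dilate_alt]
  calc
    (PySem.List.pyRange 0 h 1).foldl (fun out ni =>
      (PySem.List.pyRange 0 w 1).foldl (fun out nj =>
        (PySem.List.pyRange 0 (k.length : Int) 1).foldl (fun out ki =>
          (PySem.List.pyRange 0 (k.length : Int) 1).foldl (fun out kj =>
            if pyGet2 k ki kj = 1 then
              if 0 ≤ ni - ki + PySem.Int.floordiv (k.length : Int) 2 ∧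
                 ni - ki + PySem.Int.floordiv (k.length : Int) 2 < h ∧
                 0 ≤ nj - kj + PySem.Int.floordiv (k.length : Int) 2 ∧
                 nj - kj + PySem.Int.floordiv (k.length : Int) 2 < w then
                pySet2 out (ni - ki + PySem.Int.floordiv (k.length : Int) 2)
                  (nj - kj + PySem.Int.floordiv (k.length : Int) 2)
                  (max (pyGet2 out (ni - ki + PySem.Int.floordiv (k.length : Int) 2)
                    (nj - kj + PySem.Int.floordiv (k.length : Int) 2)) (pyGet2 g ni nj))
              else out
            else out) out) out) out) (List.replicate h.toNat (List.replicate w.toNat 0))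
      = (PySem.List.pyRange 0 h 1).foldl (fun out ni =>
          (PySem.List.pyRange 0 w 1).foldl (fun out nj =>
            (pvK2 (k.length : Int)).foldl (fun o qq =>
              if pvCb w h (PySem.Int.floordiv (k.length : Int) 2) k ((ni, nj), qq) = true then
                pySet2 o (pvI (PySem.Int.floordiv (k.length : Int) 2) ((ni, nj), qq))
                  (pvJ (PySem.Int.floordiv (k.length : Int) 2) ((ni, nj), qq))
                  (max (pyGet2 o (pvI (PySem.Int.floordiv (k.length : Int) 2) ((ni, nj), qq))
                    (pvJ (PySem.Int.floordiv (k.length : Int) 2) ((ni, nj), qq))) (pvV g ((ni, nj), qq)))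
              else o) out) out) (List.replicate h.toNat (List.replicate w.toNat 0)) := by
        apply PySem.List.foldl_congr_mem
        intro acc ni _
        apply PySem.List.foldl_congr_mem
        intro acc2 nj _
        refine Eq.trans ?_ (pv_foldl_foldl (fun o (qq : Int × Int) =>
          if pvCb w h (PySem.Int.floordiv (k.length : Int) 2) k ((ni, nj), qq) = true then
            pySet2 o (pvI (PySem.Int.floordiv (k.length : Int) 2) ((ni, nj), qq))
              (pvJ (PySem.Int.floordiv (k.length : Int) 2) ((ni, nj), qq))
              (max (pyGet2 o (pvI (PySem.Int.floordiv (k.length : Int) 2) ((ni, nj), qq))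
                (pvJ (PySem.Int.floordiv (k.length : Int) 2) ((ni, nj), qq))) (pvV g ((ni, nj), qq)))
          else o) (PySem.List.pyRange 0 (k.length : Int) 1) (PySem.List.pyRange 0 (k.length : Int) 1) acc2)
        apply PySem.List.foldl_congr_mem
        intro acc3 ki _
        apply PySem.List.foldl_congr_mem
        intro acc4 kj _
        simp only [pvCb, pvI, pvJ, pvV, Bool.and_eq_true, decide_eq_true_eq]
        split_ifs <;> first | rfl | tauto
    _ = (pvL1 w h).foldl (fun out p =>
          (pvK2 (k.length : Int)).foldl (fun o qq =>
            if pvCb w h (PySem.Int.floordiv (k.length : Int) 2) k (p, qq) = true then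
              pySet2 o (pvI (PySem.Int.floordiv (k.length : Int) 2) (p, qq))
                (pvJ (PySem.Int.floordiv (k.length : Int) 2) (p, qq))
                (max (pyGet2 o (pvI (PySem.Int.floordiv (k.length : Int) 2) (p, qq))
                  (pvJ (PySem.Int.floordiv (k.length : Int) 2) (p, qq))) (pvV g (p, qq)))
            else o) out) (List.replicate h.toNat (List.replicate w.toNat 0)) :=
        pv_foldl_foldl (f := fun out (p : Int × Int) =>
          (pvK2 (k.length : Int)).foldl (fun o qq =>
            if pvCb w h (PySem.Int.floordiv (k.length : Int) 2) k (p, qq) = true then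
              pySet2 o (pvI (PySem.Int.floordiv (k.length : Int) 2) (p, qq))
                (pvJ (PySem.Int.floordiv (k.length : Int) 2) (p, qq))
                (max (pyGet2 o (pvI (PySem.Int.floordiv (k.length : Int) 2) (p, qq))
                  (pvJ (PySem.Int.floordiv (k.length : Int) 2) (p, qq))) (pvV g (p, qq)))
            else o) out) (PySem.List.pyRange 0 h 1) (PySem.List.pyRange 0 w 1) _
    _ = (pvQ w h (k.length : Int)).foldl
          (fun o q => if pvCb w h (PySem.Int.floordiv (k.length : Int) 2) k q = true then
              pySet2 o (pvI (PySem.Int.floordiv (k.length : Int) 2) q)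
                (pvJ (PySem.Int.floordiv (k.length : Int) 2) q)
                (max (pyGet2 o (pvI (PySem.Int.floordiv (k.length : Int) 2) q)
                  (pvJ (PySem.Int.floordiv (k.length : Int) 2) q)) (pvV g q))
            else o)
          (List.replicate h.toNat (List.replicate w.toNat 0)) :=
        pv_foldl_foldl (f := fun o (q : (Int × Int) × Int × Int) =>
          if pvCb w h (PySem.Int.floordiv (k.length : Int) 2) k q = true then
            pySet2 o (pvI (PySem.Int.floordiv (k.length : Int) 2) q)
              (pvJ (PySem.Int.floordiv (k.length : Int) 2) q)
              (max (pyGet2 o (pvI (PySem.Int.floordiv (k.length : Int) 2) q)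
                (pvJ (PySem.Int.floordiv (k.length : Int) 2) q)) (pvV g q))
          else o) (pvL1 w h) (pvK2 (k.length : Int)) _

theorem pv_M_flat (w h off : Int) (g k : List (List Int)) (i j : Int) :
    dilateMaxVal w h g k (k.length : Int) off i j
      = ((pvK2 (k.length : Int)).flatMap (fun qq =>
          if pyGet2 k qq.1 qq.2 = 1 ∧ 0 ≤ i + qq.1 - off ∧ i + qq.1 - off < h ∧
             0 ≤ j + qq.2 - off ∧ j + qq.2 - off < w
          then [pyGet2 g (i + qq.1 - off) (j + qq.2 - off)] else [])).foldl
          (fun m v => max m v) 0 := by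
  simp only [dilateMaxVal]
  calc
    (PySem.List.pyRange 0 (k.length : Int) 1).foldl (fun mv ki =>
      (PySem.List.pyRange 0 (k.length : Int) 1).foldl (fun mv kj =>
        if pyGet2 k ki kj = 1 then
          if 0 ≤ i + ki - off ∧ i + ki - off < h ∧ 0 ≤ j + kj - off ∧ j + kj - off < w then
            max mv (pyGet2 g (i + ki - off) (j + kj - off))
          else mv
        else mv) mv) 0
      = (PySem.List.pyRange 0 (k.length : Int) 1).foldl (fun mv ki =>
          (PySem.List.pyRange 0 (k.length : Int) 1).foldl (fun mv kj =>
            if pyGet2 k ki kj = 1 ∧ 0 ≤ i + ki - off ∧ i + ki - off < h ∧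
               0 ≤ j + kj - off ∧ j + kj - off < w then
              max mv (pyGet2 g (i + ki - off) (j + kj - off))
            else mv) mv) 0 := by
        apply PySem.List.foldl_congr_mem
        intro acc ki _
        apply PySem.List.foldl_congr_mem
        intro acc2 kj _
        split_ifs <;> first | rfl | tauto
    _ = (pvK2 (k.length : Int)).foldl (fun mv qq =>
          if pyGet2 k qq.1 qq.2 = 1 ∧ 0 ≤ i + qq.1 - off ∧ i + qq.1 - off < h ∧
             0 ≤ j + qq.2 - off ∧ j + qq.2 - off < w then
            max mv (pyGet2 g (i + qq.1 - off) (j + qq.2 - off))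
          else mv) 0 :=
        pv_foldl_foldl (f := fun mv (qq : Int × Int) =>
          if pyGet2 k qq.1 qq.2 = 1 ∧ 0 ≤ i + qq.1 - off ∧ i + qq.1 - off < h ∧
             0 ≤ j + qq.2 - off ∧ j + qq.2 - off < w then
            max mv (pyGet2 g (i + qq.1 - off) (j + qq.2 - off))
          else mv) (PySem.List.pyRange 0 (k.length : Int) 1) (PySem.List.pyRange 0 (k.length : Int) 1) 0
    _ = (((pvK2 (k.length : Int)).filter (fun qq =>
          decide (pyGet2 k qq.1 qq.2 = 1 ∧ 0 ≤ i + qq.1 - off ∧ i + qq.1 - off < h ∧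
             0 ≤ j + qq.2 - off ∧ j + qq.2 - off < w))).map
            (fun qq => pyGet2 g (i + qq.1 - off) (j + qq.2 - off))).foldl (fun m v => max m v) 0 := by
        rw [PySem.List.foldl_ite_eq_foldl_filter, List.foldl_map]
    _ = ((pvK2 (k.length : Int)).flatMap (fun qq =>
          if pyGet2 k qq.1 qq.2 = 1 ∧ 0 ≤ i + qq.1 - off ∧ i + qq.1 - off < h ∧
             0 ≤ j + qq.2 - off ∧ j + qq.2 - off < w
          then [pyGet2 g (i + qq.1 - off) (j + qq.2 - off)] else [])).foldl (fun m v => max m v) 0 := by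
        rw [pv_filter_map_flatMap]
        simp only [decide_eq_true_eq]

theorem pv_inner (w h off : Int) (g k : List (List Int)) (a b : Nat)
    (ha : (a : Int) < h) (hb : (b : Int) < w) (qq : Int × Int) :
    (PySem.List.pyRange 0 h 1).flatMap (fun ni => (PySem.List.pyRange 0 w 1).flatMap (fun nj =>
        if pvCb w h off k ((ni, nj), qq) = true ∧ pvI off ((ni, nj), qq) = (a : Int) ∧
           pvJ off ((ni, nj), qq) = (b : Int)
        then [pvV g ((ni, nj), qq)] else []))
      = if pyGet2 k qq.1 qq.2 = 1 ∧ 0 ≤ (a : Int) + qq.1 - off ∧ (a : Int) + qq.1 - off < h ∧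
           0 ≤ (b : Int) + qq.2 - off ∧ (b : Int) + qq.2 - off < w
        then [pyGet2 g ((a : Int) + qq.1 - off) ((b : Int) + qq.2 - off)] else [] := by
  by_cases hk1 : pyGet2 k qq.1 qq.2 = 1
  · have hbody : ∀ ni nj : Int,
        (if pvCb w h off k ((ni, nj), qq) = true ∧ pvI off ((ni, nj), qq) = (a : Int) ∧
            pvJ off ((ni, nj), qq) = (b : Int)
         then [pvV g ((ni, nj), qq)] else [])
          = (if ni = (a : Int) + qq.1 - off ∧ nj = (b : Int) + qq.2 - off
             then [pyGet2 g ni nj] else []) := by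
      intro ni nj
      refine if_congr ?_ rfl rfl
      simp only [pvCb, pvI, pvJ, Bool.and_eq_true, decide_eq_true_eq]
      constructor
      · rintro ⟨⟨⟨⟨⟨-, h2⟩, h3⟩, h4⟩, h5⟩, h6, h7⟩
        omega
      · rintro ⟨rfl, rfl⟩
        have hA : (0 : Int) ≤ (a : Int) := Int.natCast_nonneg a
        have hB : (0 : Int) ≤ (b : Int) := Int.natCast_nonneg b
        refine ⟨⟨⟨⟨⟨hk1, by omega⟩, by omega⟩, by omega⟩, by omega⟩, by ring, by ring⟩
    calc
      (PySem.List.pyRange 0 h 1).flatMap (fun ni => (PySem.List.pyRange 0 w 1).flatMap (fun nj =>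
          if pvCb w h off k ((ni, nj), qq) = true ∧ pvI off ((ni, nj), qq) = (a : Int) ∧
             pvJ off ((ni, nj), qq) = (b : Int)
          then [pvV g ((ni, nj), qq)] else []))
        = (PySem.List.pyRange 0 h 1).flatMap (fun ni =>
            if ni = (a : Int) + qq.1 - off then
              (PySem.List.pyRange 0 w 1).flatMap (fun nj =>
                if nj = (b : Int) + qq.2 - off then [pyGet2 g ni nj] else [])
            else []) := by
          simp only [hbody]
          refine congrArg (fun F => List.flatMap F (PySem.List.pyRange 0 h 1)) (funext fun ni => ?_)
          by_cases hni : ni = (a : Int) + qq.1 - off <;> simp [hni]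
      _ = if (a : Int) + qq.1 - off ∈ PySem.List.pyRange 0 h 1 then
            (PySem.List.pyRange 0 w 1).flatMap (fun nj =>
              if nj = (b : Int) + qq.2 - off then [pyGet2 g ((a : Int) + qq.1 - off) nj] else [])
          else [] :=
          pv_flatMap_if_singleton _ _ _ (PySem.List.nodup_pyRange_one _ _)
      _ = if (a : Int) + qq.1 - off ∈ PySem.List.pyRange 0 h 1 then
            (if (b : Int) + qq.2 - off ∈ PySem.List.pyRange 0 w 1 then
              [pyGet2 g ((a : Int) + qq.1 - off) ((b : Int) + qq.2 - off)] else [])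
          else [] := by
          rw [pv_flatMap_if_singleton _ _ _ (PySem.List.nodup_pyRange_one _ _)]
      _ = _ := by
          simp only [PySem.List.mem_pyRange_one]
          split_ifs <;> first | rfl | tauto
  · simp only [pvCb, Bool.and_eq_true, decide_eq_true_eq]
    simp [hk1]

theorem pv_cell (w h off : Int) (g k : List (List Int)) (a b : Nat)
    (ha : (a : Int) < h) (hb : (b : Int) < w) :
    ((pvQ w h (k.length : Int)).filter
        (fun q => decide ((pvCb w h off k q = true) ∧ pvI off q = (a : Int) ∧ pvJ off q = (b : Int)))).foldl
      (fun m q => max m (pvV g q)) 0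
    = dilateMaxVal w h g k (k.length : Int) off (a : Int) (b : Int) := by
  rw [pv_M_flat]
  have hmap : ∀ L : List ((Int × Int) × Int × Int),
      L.foldl (fun m q => max m (pvV g q)) 0 = (L.map (pvV g)).foldl (fun m v => max m v) 0 :=
    fun L => (List.foldl_map).symm
  rw [hmap, pv_filter_map_flatMap]
  simp only [decide_eq_true_eq]
  apply pv_perm_foldl_max (V := fun v => v)
  have hQ : ∀ F : ((Int × Int) × Int × Int) → List Int,
      (pvQ w h (k.length : Int)).flatMap F
        = (PySem.List.pyRange 0 h 1).flatMap (fun ni => (PySem.List.pyRange 0 w 1).flatMap (fun nj =>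
            (pvK2 (k.length : Int)).flatMap (fun qq => F ((ni, nj), qq)))) := by
    intro F
    simp only [pvQ, pvL1, List.flatMap_assoc, List.flatMap_map]
  rw [hQ]
  refine List.Perm.trans (List.Perm.flatMap_left _ (fun ni _ =>
    pv_flatMap_swap_perm (PySem.List.pyRange 0 w 1) (pvK2 (k.length : Int)) _)) ?_
  refine List.Perm.trans (pv_flatMap_swap_perm (PySem.List.pyRange 0 h 1) (pvK2 (k.length : Int)) _) ?_
  have hiq : ∀ qq : Int × Int,
      (PySem.List.pyRange 0 h 1).flatMap (fun ni => (PySem.List.pyRange 0 w 1).flatMap (fun nj =>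
          if pvCb w h off k ((ni, nj), qq) = true ∧ pvI off ((ni, nj), qq) = (a : Int) ∧
             pvJ off ((ni, nj), qq) = (b : Int)
          then [pvV g ((ni, nj), qq)] else []))
        = if pyGet2 k qq.1 qq.2 = 1 ∧ 0 ≤ (a : Int) + qq.1 - off ∧ (a : Int) + qq.1 - off < h ∧
             0 ≤ (b : Int) + qq.2 - off ∧ (b : Int) + qq.2 - off < w
          then [pyGet2 g ((a : Int) + qq.1 - off) ((b : Int) + qq.2 - off)] else [] :=
    pv_inner w h off g k a b ha hb
  rw [show (fun qq : Int × Int =>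
      (PySem.List.pyRange 0 h 1).flatMap (fun ni => (PySem.List.pyRange 0 w 1).flatMap (fun nj =>
          if pvCb w h off k ((ni, nj), qq) = true ∧ pvI off ((ni, nj), qq) = (a : Int) ∧
             pvJ off ((ni, nj), qq) = (b : Int)
          then [pvV g ((ni, nj), qq)] else [])))
      = (fun qq : Int × Int =>
          if pyGet2 k qq.1 qq.2 = 1 ∧ 0 ≤ (a : Int) + qq.1 - off ∧ (a : Int) + qq.1 - off < h ∧
             0 ≤ (b : Int) + qq.2 - off ∧ (b : Int) + qq.2 - off < w
          then [pyGet2 g ((a : Int) + qq.1 - off) ((b : Int) + qq.2 - off)] else [])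
    from funext hiq]

theorem pv_B_grid (w h : Int) (g k : List (List Int)) :
    dilate_alt w h g k
      = (List.range h.toNat).map (fun (a : Nat) => (List.range w.toNat).map (fun (b : Nat) =>
          dilateMaxVal w h g k (k.length : Int) (PySem.Int.floordiv (k.length : Int) 2) (a : Int) (b : Int))) := by
  rw [pv_B_flat]
  have hbnd : ∀ q, (pvCb w h (PySem.Int.floordiv (k.length : Int) 2) k q = true) →
      0 ≤ pvI (PySem.Int.floordiv (k.length : Int) 2) q ∧
      pvI (PySem.Int.floordiv (k.length : Int) 2) q < (h.toNat : Int) ∧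
      0 ≤ pvJ (PySem.Int.floordiv (k.length : Int) 2) q ∧
      pvJ (PySem.Int.floordiv (k.length : Int) 2) q < (w.toNat : Int) := by
    intro q hq
    simp only [pvCb, pvI, pvJ, Bool.and_eq_true, decide_eq_true_eq] at hq ⊢
    omega
  have hout0l : (List.replicate h.toNat (List.replicate w.toNat (0 : Int))).length = h.toNat := by
    simp
  have hout0r : ∀ r ∈ List.replicate h.toNat (List.replicate w.toNat (0 : Int)), r.length = w.toNat := by
    intro r hr
    rw [List.eq_of_mem_replicate hr]
    simp
  obtain ⟨⟨hlen, hrows⟩, hget⟩ := pv_scatter (hn := h.toNat) (wn := w.toNat)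
    (Cp := fun q => pvCb w h (PySem.Int.floordiv (k.length : Int) 2) k q = true)
    (pvI (PySem.Int.floordiv (k.length : Int) 2)) (pvJ (PySem.Int.floordiv (k.length : Int) 2)) (pvV g)
    hbnd (pvQ w h (k.length : Int)) _ hout0l hout0r
  apply List.ext_getElem
  · rw [hlen]; simp
  intro aa h1 h2
  have haa : aa < h.toNat := by rw [hlen] at h1; exact h1
  apply List.ext_getElem
  · rw [hrows _ (List.getElem_mem h1)]
    simp
  intro bb h3 h4
  have hbb : bb < w.toNat := by
    rw [hrows _ (List.getElem_mem h1)] at h3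
    exact h3
  have hz : pyGet2 (List.replicate h.toNat (List.replicate w.toNat (0 : Int))) (aa : Int) (bb : Int) = 0 := by
    rw [pv_pyGet2_natCast]
    simp [List.getD_eq_getElem?_getD, haa, hbb]
  have hcell := hget aa bb haa hbb
  rw [hz, pv_cell w h (PySem.Int.floordiv (k.length : Int) 2) g k aa bb (by omega) (by omega)] at hcell
  rw [pv_pyGet2_natCast] at hcell
  have hgd : ((List.foldl (fun o q =>
      if pvCb w h (PySem.Int.floordiv (k.length : Int) 2) k q = true then
        pySet2 o (pvI (PySem.Int.floordiv (k.length : Int) 2) q) (pvJ (PySem.Int.floordiv (k.length : Int) 2) q)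
          (max (pyGet2 o (pvI (PySem.Int.floordiv (k.length : Int) 2) q) (pvJ (PySem.Int.floordiv (k.length : Int) 2) q)) (pvV g q))
      else o) (List.replicate h.toNat (List.replicate w.toNat 0)) (pvQ w h (k.length : Int))).getD aa []).getD bb 0
      = (List.foldl (fun o q =>
      if pvCb w h (PySem.Int.floordiv (k.length : Int) 2) k q = true then
        pySet2 o (pvI (PySem.Int.floordiv (k.length : Int) 2) q) (pvJ (PySem.Int.floordiv (k.length : Int) 2) q)
          (max (pyGet2 o (pvI (PySem.Int.floordiv (k.length : Int) 2) q) (pvJ (PySem.Int.floordiv (k.length : Int) 2) q)) (pvV g q))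
      else o) (List.replicate h.toNat (List.replicate w.toNat 0)) (pvQ w h (k.length : Int)))[aa][bb]'(by assumption) := by
    simp only [List.getD_eq_getElem?_getD, List.getElem?_eq_getElem h1, Option.getD_some,
      List.getElem?_eq_getElem h3]
  rw [hgd] at hcell
  simp only [List.getElem_map, List.getElem_range]
  exact hcell

-- ===== VERDICT (by name: the statement is the Claim_ definition above) =====
theorem dilate_spec : Claim_equal_dilate := by
  intro w h g k _ _
  unfold Spec_dilate
  rw [pv_A_grid, pv_B_grid]
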